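-- pv_equiv track=rewrite | github.com/dlpKamak/PythonLearning_Scaffolding | code_blocks.py | detect_indent_size
-- ===== SOURCE A (Python) =====
-- def detect_indent_size(code: str) -> int:
--     """Auto-detect indentation size from code"""
--     lines = code.split('\n')
--     for line in lines:
--         if line and line[0] == ' ':
--             # Count leading spaces
--             spaces = len(line) - len(line.lstrip())
--             if spaces > 0:
--                 return spaces
--     return 4
-- ===== SOURCE B (Python) =====
-- def detect_indent_size(code: str) -> int:
--     """Auto-detect indentation size from code (single character scan, no split)."""
--     at_start = True
--     n = len(code)
--     i = 0
--     while i < n: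
--         c = code[i]
--         if c == '\n':
--             at_start = True
--         elif at_start and c == ' ':
--             j = i
--             while j < n and code[j] != '\n' and code[j].isspace():
--                 j += 1
--             return j - i
--         else:
--             at_start = False
--         i += 1
--     return 4
-- ===== Notes on version B (the rewrite author's own statement) =====
-- stated objective: alternative
-- what changed: Replaces the split-into-lines loop with its per-line lstrip by a single character scan that tracks a line-start flag and counts the leading whitespace run directly at the first space-indented line.
import Mathlib
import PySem

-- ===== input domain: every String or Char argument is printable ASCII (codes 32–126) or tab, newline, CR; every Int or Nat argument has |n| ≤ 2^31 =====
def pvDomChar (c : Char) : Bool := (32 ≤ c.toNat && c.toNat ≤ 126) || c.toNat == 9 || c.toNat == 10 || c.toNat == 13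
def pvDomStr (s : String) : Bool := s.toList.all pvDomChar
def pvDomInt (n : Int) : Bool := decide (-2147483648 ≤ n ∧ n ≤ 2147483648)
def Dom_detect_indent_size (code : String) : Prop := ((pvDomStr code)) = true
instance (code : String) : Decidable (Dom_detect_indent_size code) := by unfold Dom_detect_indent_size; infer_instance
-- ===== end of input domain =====

-- B replaces A's split-into-lines + per-line lstrip with a single character scan
-- tracking a line-start flag (objective: alternative; same asymptotic cost).

-- ===== PORT A =====
-- the for-loop over the lines of code.split('\n')
def aLoop : List (List Char) → Int
  | [] => 4
  | line :: rest =>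
    if line ≠ [] ∧ PySem.List.pyGet? line 0 = some ' ' then
      let spaces : Int := (line.length : Int) - ((PySem.Chars.lstrip line).length : Int)
      if spaces > 0 then spaces else aLoop rest
    else aLoop rest

def detect_indent_size (code : String) : Int :=
  aLoop (PySem.Chars.splitOn code.toList ['\n'])

-- ===== PORT B =====
-- inner while loop: length of the leading run of non-newline whitespace
def bCount (cs : List Char) : Nat :=
  (cs.takeWhile (fun c => PySem.Chars.isspace c && !(c == '\n'))).length

-- outer while loop: scan with the at_start flag
def bLoop : Bool → List Char → Int
  | _, [] => 4
  | atStart, c :: cs =>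
    if c = '\n' then bLoop true cs
    else if atStart && (c == ' ') then (bCount (c :: cs) : Int)
    else bLoop false cs

def detect_indent_size_alt (code : String) : Int := bLoop true code.toList

-- ===== PRECONDITION & SPEC =====
def Spec_detect_indent_size (code : String) (out : Int) : Prop := out = detect_indent_size_alt code
instance (code : String) (out : Int) : Decidable (Spec_detect_indent_size code out) := by unfold Spec_detect_indent_size; infer_instance

-- ===== CLAIM (what is proved, stated in full; the proofs are below) =====
def Claim_equal_detect_indent_size : Prop := ∀ (code : String), Dom_detect_indent_size code → Spec_detect_indent_size code (detect_indent_size code)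

-- ===== LEMMAS AND PROOFS =====

-- proof-side model of code.split('\n') (single-character separator)
def consTo (x : List Char) : List (List Char) → List (List Char)
  | [] => [x]
  | h :: t => (x ++ h) :: t

def mySplit : List Char → List (List Char)
  | [] => [[]]
  | c :: cs => if c = '\n' then [] :: mySplit cs else consTo [c] (mySplit cs)

theorem mySplit_ne_nil (cs : List Char) : mySplit cs ≠ [] := by
  cases cs with
  | nil => simp [mySplit]
  | cons c cs =>
    simp only [mySplit]
    split
    · simp
    · cases h : mySplit cs <;> simp [consTo]

theorem goEq (fuel : Nat) (l cur : List Char) (acc : List (List Char))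
    (h : l.length ≤ fuel) :
    PySem.Chars.splitOn.go ['\n'] fuel l cur acc = acc.reverse ++ consTo cur.reverse (mySplit l) := by
  induction fuel generalizing l cur acc with
  | zero =>
    have : l = [] := by cases l <;> simp_all
    subst this
    simp [PySem.Chars.splitOn.go, mySplit, consTo]
  | succ fuel ih =>
    cases l with
    | nil => simp [PySem.Chars.splitOn.go, mySplit, consTo]
    | cons c rest =>
      by_cases hc : c = '\n'
      · subst hc
        have hpre : List.isPrefixOf ['\n'] ('\n' :: rest) = true := by
          simp [List.isPrefixOf]
        rw [PySem.Chars.splitOn.go]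
        simp only [hpre, if_pos]
        rw [show List.drop (['\n'].length) ('\n' :: rest) = rest from rfl]
        rw [ih rest [] (cur.reverse :: acc) (by simpa using Nat.le_of_succ_le_succ h)]
        simp [mySplit]
        cases hm : mySplit rest with
        | nil => exact absurd hm (mySplit_ne_nil rest)
        | cons h' t' => simp [consTo]
      · have hpre : List.isPrefixOf ['\n'] (c :: rest) = false := by
          simp only [List.isPrefixOf, Bool.and_true, beq_eq_false_iff_ne, ne_eq]
          exact fun e => hc e.symm
        rw [PySem.Chars.splitOn.go]
        simp only [hpre]
        rw [if_neg (by simp)]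
        rw [ih rest (c :: cur) acc (by simpa using Nat.le_of_succ_le_succ h)]
        simp only [mySplit, if_neg hc]
        cases hm : mySplit rest with
        | nil => exact absurd hm (mySplit_ne_nil rest)
        | cons h' t' => simp [consTo]

theorem splitOn_eq_mySplit (cs : List Char) :
    PySem.Chars.splitOn cs ['\n'] = mySplit cs := by
  rw [PySem.Chars.splitOn, goEq (cs.length + 1) cs [] [] (by omega)]
  cases hm : mySplit cs with
  | nil => exact absurd hm (mySplit_ne_nil cs)
  | cons h t => simp [consTo]

-- p' is B's whitespace test
def pB (c : Char) : Bool := PySem.Chars.isspace c && !(c == '\n')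

theorem takeWhile_len (p : Char → Bool) (l : List Char) :
    (l.takeWhile p).length + (l.dropWhile p).length = l.length := by
  rw [← List.length_append, List.takeWhile_append_dropWhile]

-- the one joint invariant of the two loops
theorem mainInv (cs : List Char) :
    bLoop true cs = aLoop (mySplit cs) ∧
    bLoop false cs = aLoop (mySplit cs).tail ∧
    (∀ h t, mySplit cs = h :: t →
      cs.takeWhile pB = h.takeWhile PySem.Chars.isspace) := by
  induction cs with
  | nil =>
    refine ⟨by simp [bLoop, mySplit, aLoop], by simp [bLoop, mySplit, aLoop], ?_⟩
    intro h t hm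
    simp [mySplit] at hm
    simp [hm.1]
  | cons c cs ih =>
    obtain ⟨ihT, ihF, ihTW⟩ := ih
    by_cases hc : c = '\n'
    · subst hc
      refine ⟨?_, ?_, ?_⟩
      · simp [bLoop, mySplit, aLoop, ihT]
      · simp [bLoop, mySplit, ihT]
      · intro h t hm
        simp [mySplit] at hm
        simp [List.takeWhile, pB, hm.1]
    · obtain ⟨h, t, hm⟩ : ∃ h t, mySplit cs = h :: t := by
        cases hmm : mySplit cs with
        | nil => exact absurd hmm (mySplit_ne_nil cs)
        | cons h t => exact ⟨h, t, rfl⟩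
      have hsplit : mySplit (c :: cs) = (c :: h) :: t := by
        simp [mySplit, if_neg hc, hm, consTo]
      have htw : (c :: cs).takeWhile pB = (c :: h).takeWhile PySem.Chars.isspace := by
        have hp : pB c = PySem.Chars.isspace c := by
          simp [pB, hc]
        simp only [List.takeWhile, hp]
        cases hs : PySem.Chars.isspace c <;> simp [ihTW h t hm]
      refine ⟨?_, ?_, ?_⟩
      · -- at line start
        by_cases hsp : c = ' '
        · subst hsp
          have hcount : (bCount (' ' :: cs) : Int) =
              ((' ' :: h).length : Int) - (((' ' :: h).dropWhile PySem.Chars.isspace).length : Int) := by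
            have h1 := takeWhile_len PySem.Chars.isspace (' ' :: h)
            have h2 : bCount (' ' :: cs) = ((' ' :: h).takeWhile PySem.Chars.isspace).length := by
              simp only [bCount]
              rw [show (fun c => PySem.Chars.isspace c && !(c == '\n')) = pB from rfl, htw]
            rw [h2]; omega
          have hpos : 0 < ((' ' :: h).takeWhile PySem.Chars.isspace).length := by
            have : PySem.Chars.isspace ' ' = true := by decide
            simp [List.takeWhile, this]
          rw [hsplit]
          simp only [bLoop, aLoop]
          rw [if_neg (by decide), if_pos (by decide)]
          rw [if_pos ⟨by simp, by simp [PySem.List.pyGet?, PySem.List.pyIdx?]⟩]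
          have h1 := takeWhile_len PySem.Chars.isspace (' ' :: h)
          rw [if_pos (by simp only [PySem.Chars.lstrip]; omega)]
          simp only [PySem.Chars.lstrip]
          rw [hcount]
        · -- line starts with a non-space, non-newline char: both skip to the next line
          rw [hsplit]
          simp only [bLoop]
          rw [if_neg hc, if_neg (by simp [hsp])]
          rw [ihF, hm]
          simp only [aLoop, List.tail_cons]
          rw [if_neg (by
            rintro ⟨-, hg⟩
            simp [PySem.List.pyGet?, PySem.List.pyIdx?] at hg
            exact hsp hg)]
      · -- mid-line: skip this char
        rw [hsplit]
        simp only [bLoop]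
        rw [if_neg hc, if_neg (by simp)]
        rw [ihF, hm]
        simp only [List.tail_cons]
      · intro h' t' hm'
        rw [hsplit] at hm'
        injection hm' with e1 e2
        rw [← e1]
        exact htw

-- ===== VERDICT (by name: the statement is the Claim_ definition above) =====
theorem detect_indent_size_spec : Claim_equal_detect_indent_size := by
  intro code _
  unfold Spec_detect_indent_size detect_indent_size detect_indent_size_alt
  rw [splitOn_eq_mySplit]
  exact (mainInv code.toList).1.symm
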